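-- pv_equiv track=rewrite | github.com/AzRea7/onehaven | products/compliance/backend/src/services/inspection_scheduling_service.py | _normalize_offsets
-- ===== SOURCE A (Python) =====
-- def _normalize_offsets(values: list[int] | None) -> list[int]:
--     raw = list(values or [1440, 120, 30])
--     out: list[int] = []
--     for value in raw:
--         try:
--             minutes = int(value)
--         except Exception:
--             continue
--         if minutes < 0:
--             continue
--         if minutes not in out:
--             out.append(minutes)
--     return sorted(out, reverse=True)
-- ===== SOURCE B (Python) =====
-- def _normalize_offsets(values: list[int] | None) -> list[int]:
--     raw = list(values or [1440, 120, 30])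
--     vals: list[int] = []
--     for value in raw:
--         try:
--             minutes = int(value)
--         except Exception:
--             continue
--         if minutes >= 0:
--             vals.append(minutes)
--     vals.sort(reverse=True)
--     result: list[int] = []
--     for m in vals:
--         if not result or result[-1] != m:
--             result.append(m)
--     return result
-- ===== Notes on version B (the rewrite author's own statement) =====
-- stated objective: faster
-- what changed: Replaces the quadratic membership-check dedup inside the collection loop by: collect all valid non-negative minutes with duplicates, sort descending, then one adjacency scan dropping consecutive duplicates.
import Mathlib
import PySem

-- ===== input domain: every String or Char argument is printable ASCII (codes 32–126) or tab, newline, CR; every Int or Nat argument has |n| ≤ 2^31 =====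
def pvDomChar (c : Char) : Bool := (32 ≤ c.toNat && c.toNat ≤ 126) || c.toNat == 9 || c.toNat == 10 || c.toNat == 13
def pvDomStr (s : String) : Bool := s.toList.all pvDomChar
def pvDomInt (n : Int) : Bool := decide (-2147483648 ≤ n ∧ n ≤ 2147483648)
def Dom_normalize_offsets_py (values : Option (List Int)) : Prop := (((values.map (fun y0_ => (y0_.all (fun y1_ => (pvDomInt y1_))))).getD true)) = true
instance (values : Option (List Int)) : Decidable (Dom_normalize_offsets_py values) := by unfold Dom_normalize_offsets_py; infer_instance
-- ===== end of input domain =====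

-- B replaces A's quadratic in-loop membership dedup by collect-all / sort-descending / one adjacency
-- scan dropping consecutive duplicates (objective: faster, O(n log n) vs O(n^2)).


-- ===== PORT A =====
-- raw = list(values or [1440, 120, 30]): None or the empty list fall back to the default.
-- int(value) on an int is the identity and never raises, so the try/except is the identity here.
def normalize_offsets_py (values : Option (List Int)) : List Int :=
  let raw : List Int := match values with
    | some (v :: vs) => v :: vs
    | _ => [1440, 120, 30]
  let out : List Int := raw.foldl (fun out value =>
    let minutes := value
    if minutes < 0 then out
    else if minutes ∈ out then out
    else out ++ [minutes]) []
  PySem.List.sorted out (fun x => x) true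

-- ===== PORT B =====
def normalize_offsets_py_alt (values : Option (List Int)) : List Int :=
  let raw : List Int := match values.getD [] with
    | [] => [1440, 120, 30]
    | v :: vs => v :: vs
  let vals : List Int := raw.foldl (fun vals value =>
    let minutes := value
    if minutes ≥ 0 then vals ++ [minutes] else vals) []
  let sortedVals := PySem.List.sorted vals (fun x => x) true
  sortedVals.foldl (fun result m =>
    if result = [] ∨ result.getLast? ≠ some m then result ++ [m] else result) []

-- ===== PRECONDITION & SPEC =====
def Spec_normalize_offsets_py (values : Option (List Int)) (out : List Int) : Prop := out = normalize_offsets_py_alt values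
instance (values : Option (List Int)) (out : List Int) : Decidable (Spec_normalize_offsets_py values out) := by unfold Spec_normalize_offsets_py; infer_instance

-- ===== CLAIM (what is proved, stated in full; the proofs are below) =====
def Claim_equal_normalize_offsets_py : Prop := ∀ (values : Option (List Int)), Dom_normalize_offsets_py values → Spec_normalize_offsets_py values (normalize_offsets_py values)

-- ===== LEMMAS AND PROOFS =====

-- A's accumulator: nodup, membership = a non-negative element of the processed prefix.
theorem foldA_inv (l acc : List Int) (hnd : acc.Nodup) :
    (l.foldl (fun out value =>
      if value < 0 then out else if value ∈ out then out else out ++ [value]) acc).Nodup ∧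
    (∀ x, x ∈ l.foldl (fun out value =>
      if value < 0 then out else if value ∈ out then out else out ++ [value]) acc ↔
      x ∈ acc ∨ (x ∈ l ∧ ¬ x < 0)) := by
  induction l generalizing acc with
  | nil => simpa using hnd
  | cons v t ih =>
    by_cases hv : v < 0
    · simp only [List.foldl_cons, if_pos hv]
      have := ih acc hnd
      refine ⟨this.1, fun x => ?_⟩
      rw [this.2 x]
      constructor
      · rintro (h | ⟨h1, h2⟩)
        · exact Or.inl h
        · exact Or.inr ⟨List.mem_cons_of_mem _ h1, h2⟩
      · rintro (h | ⟨h1, h2⟩)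
        · exact Or.inl h
        · rcases List.mem_cons.mp h1 with rfl | h1
          · exact absurd hv h2
          · exact Or.inr ⟨h1, h2⟩
    · by_cases hm : v ∈ acc
      · simp only [List.foldl_cons, if_neg hv, if_pos hm]
        have := ih acc hnd
        refine ⟨this.1, fun x => ?_⟩
        rw [this.2 x]
        constructor
        · rintro (h | ⟨h1, h2⟩)
          · exact Or.inl h
          · exact Or.inr ⟨List.mem_cons_of_mem _ h1, h2⟩
        · rintro (h | ⟨h1, h2⟩)
          · exact Or.inl h
          · rcases List.mem_cons.mp h1 with rfl | h1
            · exact Or.inl hm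
            · exact Or.inr ⟨h1, h2⟩
      · simp only [List.foldl_cons, if_neg hv, if_neg hm]
        have hnd' : (acc ++ [v]).Nodup := by
          refine hnd.append (List.nodup_singleton v) ?_
          intro a ha hv'
          simp only [List.mem_singleton] at hv'
          exact hm (hv' ▸ ha)
        have := ih (acc ++ [v]) hnd'
        refine ⟨this.1, fun x => ?_⟩
        rw [this.2 x]
        simp only [List.mem_append, List.mem_cons, List.not_mem_nil, or_false]
        constructor
        · rintro ((h | rfl) | ⟨h1, h2⟩)
          · exact Or.inl h
          · exact Or.inr ⟨Or.inl rfl, hv⟩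
          · exact Or.inr ⟨Or.inr h1, h2⟩
        · rintro (h | ⟨(rfl | h1), h2⟩)
          · exact Or.inl (Or.inl h)
          · exact Or.inl (Or.inr rfl)
          · exact Or.inr ⟨h1, h2⟩

-- B's collection loop is a filter.
theorem foldB_filter (l acc : List Int) :
    l.foldl (fun vals value => if value ≥ 0 then vals ++ [value] else vals) acc
      = acc ++ l.filter (fun v => decide (0 ≤ v)) := by
  induction l generalizing acc with
  | nil => simp
  | cons v t ih =>
    by_cases hv : v ≥ 0
    · simp [List.foldl_cons, ih, hv]
    · have : ¬ (0 : Int) ≤ v := hv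
      simp [List.foldl_cons, ih, this]

-- In a strictly decreasing list the last element is the least.
theorem last_le_of_pairwise_gt (L : List Int) (hL : L ≠ [])
    (hP : L.Pairwise (fun a b : Int => b < a)) : ∀ a ∈ L, L.getLast hL ≤ a := by
  induction L with
  | nil => exact absurd rfl hL
  | cons x xs ihL =>
    intro a ha
    rcases List.mem_cons.mp ha with rfl | ha
    · rcases Decidable.em (xs = []) with rfl | hxs
      · simp
      · have hlt := (List.pairwise_cons.mp hP).1 _ (List.getLast_mem hxs)
        rw [List.getLast_cons hxs]
        exact le_of_lt hlt
    · rcases Decidable.em (xs = []) with rfl | hxs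
      · simp at ha
      · rw [List.getLast_cons hxs]
        exact ihL hxs (List.pairwise_cons.mp hP).2 a ha

-- The adjacency-dedup fold over a weakly decreasing list: strictly decreasing result, same members.
theorem dedup_inv (s acc : List Int)
    (hs : s.Pairwise (fun a b : Int => b ≤ a))
    (hacc : acc.Pairwise (fun a b : Int => b < a))
    (hlast : ∀ a, acc.getLast? = some a → ∀ b ∈ s, b ≤ a) :
    (s.foldl (fun result m =>
      if result = [] ∨ result.getLast? ≠ some m then result ++ [m] else result) acc).Pairwise
        (fun a b : Int => b < a) ∧
    (∀ x, x ∈ s.foldl (fun result m =>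
      if result = [] ∨ result.getLast? ≠ some m then result ++ [m] else result) acc ↔
      x ∈ acc ∨ x ∈ s) := by
  induction s generalizing acc with
  | nil => simpa using hacc
  | cons m t ih =>
    have ht : t.Pairwise (fun a b : Int => b ≤ a) := (List.pairwise_cons.mp hs).2
    have hmt : ∀ b ∈ t, b ≤ m := (List.pairwise_cons.mp hs).1
    by_cases hc : acc = [] ∨ acc.getLast? ≠ some m
    · simp only [List.foldl_cons, if_pos hc]
      have hacc' : (acc ++ [m]).Pairwise (fun a b : Int => b < a) := by
        rw [List.pairwise_append]
        refine ⟨hacc, List.pairwise_singleton _ _, ?_⟩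
        intro a ha b hb
        rw [List.mem_singleton] at hb
        have hne : acc ≠ [] := by rintro rfl; simp at ha
        have hne2 : acc.getLast? ≠ some m := by
          rcases hc with h | h
          · exact absurd h hne
          · exact h
        have hL : acc.getLast? = some (acc.getLast hne) := List.getLast?_eq_some_getLast hne
        have hml : m ≤ acc.getLast hne := hlast _ hL m List.mem_cons_self
        have hne3 : m ≠ acc.getLast hne := fun h => hne2 (h ▸ hL)
        have h1 : acc.getLast hne ≤ a := last_le_of_pairwise_gt acc hne hacc a ha
        rw [hb]
        omega
      have hlast' : ∀ a, (acc ++ [m]).getLast? = some a → ∀ b ∈ t, b ≤ a := by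
        intro a hga b hb
        rw [List.getLast?_concat] at hga
        have : a = m := (Option.some_inj.mp hga).symm
        subst this
        exact hmt b hb
      have := ih (acc ++ [m]) ht hacc' hlast'
      refine ⟨this.1, fun x => ?_⟩
      rw [this.2 x]
      simp only [List.mem_append, List.mem_cons, List.not_mem_nil, or_false]
      tauto
    · simp only [List.foldl_cons, if_neg hc]
      rcases not_or.mp hc with ⟨hne, hlm'⟩
      have hlm : acc.getLast? = some m := not_not.mp hlm'
      have hlast' : ∀ a, acc.getLast? = some a → ∀ b ∈ t, b ≤ a := by
        intro a hga b hb
        have ham : a = m := Option.some_inj.mp (hga.symm.trans hlm)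
        subst ham
        exact hmt b hb
      have := ih acc ht hacc hlast'
      refine ⟨this.1, fun x => ?_⟩
      rw [this.2 x]
      constructor
      · rintro (h | h)
        · exact Or.inl h
        · exact Or.inr (List.mem_cons_of_mem _ h)
      · rintro (h | h)
        · exact Or.inl h
        · rcases List.mem_cons.mp h with rfl | h
          · left
            have : x ∈ acc.getLast? := by rw [hlm]; rfl
            exact List.mem_of_mem_getLast? this
          · exact Or.inr h

-- Main agreement on any raw list.
theorem core_eq (raw : List Int) :
    PySem.List.sorted
      (raw.foldl (fun out value =>
        if value < 0 then out else if value ∈ out then out else out ++ [value]) [])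
      (fun x => x) true
    = (PySem.List.sorted
        (raw.foldl (fun vals value => if value ≥ 0 then vals ++ [value] else vals) [])
        (fun x => x) true).foldl
        (fun result m => if result = [] ∨ result.getLast? ≠ some m then result ++ [m] else result) [] := by
  set outA := raw.foldl (fun out value =>
    if value < 0 then out else if value ∈ out then out else out ++ [value]) [] with houtA
  have hA := foldA_inv raw [] (List.nodup_nil)
  have hAnd : outA.Nodup := hA.1
  have hAmem : ∀ x, x ∈ outA ↔ x ∈ raw ∧ ¬ x < 0 := by
    intro x; rw [hA.2 x]; simp
  set vals := raw.foldl (fun vals value => if value ≥ 0 then vals ++ [value] else vals) [] with hvals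
  have hfilter : vals = raw.filter (fun v => decide (0 ≤ v)) := by
    rw [hvals, foldB_filter raw [], List.nil_append]
  set s := PySem.List.sorted vals (fun x => x) true with hsdef
  have hsp : s.Pairwise (fun a b : Int => b ≤ a) := PySem.List.sorted_pairwise_rev vals (fun x => x)
  have hD := dedup_inv s [] hsp (List.Pairwise.nil) (by intro a ha; simp at ha)
  set d := s.foldl (fun result m =>
    if result = [] ∨ result.getLast? ≠ some m then result ++ [m] else result) [] with hd
  have hdp : d.Pairwise (fun a b : Int => b < a) := hD.1
  have hdmem : ∀ x, x ∈ d ↔ x ∈ vals := by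
    intro x
    rw [hD.2 x]
    simp only [List.not_mem_nil, false_or]
    rw [hsdef, PySem.List.mem_sorted]
  have hdnd : d.Nodup := hdp.imp (fun h => ne_of_gt h)
  have hperm : d.Perm outA := by
    rw [List.perm_ext_iff_of_nodup hdnd hAnd]
    intro x
    rw [hdmem x, hAmem x, hfilter]
    simp only [List.mem_filter, decide_eq_true_eq]
    constructor
    · rintro ⟨h1, h2⟩; exact ⟨h1, by omega⟩
    · rintro ⟨h1, h2⟩; exact ⟨h1, by omega⟩
  exact PySem.List.sorted_rev_eq_of_perm_of_pairwise_gt outA d (fun x => x) hperm hdp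

-- ===== VERDICT (by name: the statement is the Claim_ definition above) =====
theorem normalize_offsets_py_spec : Claim_equal_normalize_offsets_py := by
  intro values _
  unfold Spec_normalize_offsets_py normalize_offsets_py normalize_offsets_py_alt
  match values with
  | none => exact core_eq [1440, 120, 30]
  | some [] => exact core_eq [1440, 120, 30]
  | some (v :: vs) => exact core_eq (v :: vs)
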